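-- pv_equiv track=rewrite | github.com/CSerratoDev/LeetCode_Algoritms_Resources_and_Problems | Codeforces/Python/A/96A_Football.py | dangerousPlay
-- ===== SOURCE A (Python) =====
-- def dangerousPlay(players):
--     count = 1
--     for i in range(1, len(players)):
--         if players[i] == players[i-1]:
--             count += 1
--             if count >= 7:
--                 return "YES"
--         else:
--             count = 1
--     return "NO"
-- ===== SOURCE B (Python) =====
-- def dangerousPlay(players):
--     # group-then-check: build maximal runs, then test any run length >= 7
--     runs = []
--     for p in players:
--         if runs and runs[-1][0] == p:
--             runs[-1][1] += 1
--         else: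
--             runs.append([p, 1])
--     return "YES" if any(n >= 7 for _, n in runs) else "NO"
-- ===== Notes on version B (the rewrite author's own statement) =====
-- stated objective: alternative
-- what changed: Replaces the running-counter scan with early return by a group-then-check decomposition: build the list of maximal runs, then ask whether any run length is >= 7.
import Mathlib
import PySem

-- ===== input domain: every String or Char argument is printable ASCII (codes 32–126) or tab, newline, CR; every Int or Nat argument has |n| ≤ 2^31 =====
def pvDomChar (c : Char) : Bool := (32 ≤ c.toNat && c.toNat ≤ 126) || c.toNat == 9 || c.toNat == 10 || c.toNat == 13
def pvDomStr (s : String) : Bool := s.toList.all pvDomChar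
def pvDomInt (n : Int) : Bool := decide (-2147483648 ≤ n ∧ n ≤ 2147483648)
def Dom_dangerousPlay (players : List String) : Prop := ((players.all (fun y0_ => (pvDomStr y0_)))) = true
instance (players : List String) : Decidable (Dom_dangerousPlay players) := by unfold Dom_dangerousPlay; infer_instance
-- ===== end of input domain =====

-- B replaces A's running-counter scan (with early return) by a group-then-check
-- decomposition over maximal runs; alternative structure, same O(n) cost.


-- ===== PORT A =====
-- A's loop compares players[i] with players[i-1], keeps a running count and
-- returns "YES" as soon as count reaches 7; ported as the obvious structural
-- recursion carrying (previous element, count).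
def dangerousPlayGo (prev : String) (count : Int) : List String → String
  | [] => "NO"
  | x :: rest =>
    if x = prev then
      if count + 1 ≥ 7 then "YES" else dangerousPlayGo x (count + 1) rest
    else dangerousPlayGo x 1 rest

def dangerousPlay (players : List String) : String :=
  match players with
  | [] => "NO"
  | p0 :: rest => dangerousPlayGo p0 1 rest

-- ===== PORT B =====
-- step of Source B's run-building loop: extend the last run or start a new one
def dangerousPlayStep (runs : List (String × Int)) (p : String) : List (String × Int) :=
  match runs.getLast? with
  | some (q, n) => if q = p then runs.dropLast ++ [(q, n + 1)] else runs ++ [(p, 1)]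
  | none => [(p, 1)]

def dangerousPlay_alt (players : List String) : String :=
  let runs := players.foldl dangerousPlayStep []
  if runs.any (fun r => decide (7 ≤ r.2)) then "YES" else "NO"

-- ===== PRECONDITION & SPEC =====
def Spec_dangerousPlay (players : List String) (out : String) : Prop := out = dangerousPlay_alt players
instance (players : List String) (out : String) : Decidable (Spec_dangerousPlay players out) := by unfold Spec_dangerousPlay; infer_instance

-- ===== CLAIM (what is proved, stated in full; the proofs are below) =====
def Claim_equal_dangerousPlay : Prop := ∀ (players : List String), Dom_dangerousPlay players → Spec_dangerousPlay players (dangerousPlay players)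

-- ===== LEMMAS AND PROOFS =====

-- reference predicate: scanning rest with current run (prev, count), does the
-- count ever reach 7?
def anyRun7 (prev : String) (count : Int) : List String → Bool
  | [] => false
  | x :: rest =>
    if x = prev then (decide (count + 1 ≥ 7) || anyRun7 x (count + 1) rest)
    else anyRun7 x 1 rest

theorem goA (rest : List String) : ∀ (prev : String) (count : Int),
    dangerousPlayGo prev count rest = (if anyRun7 prev count rest then "YES" else "NO") := by
  induction rest with
  | nil => intro prev count; rfl
  | cons x rest ih =>
    intro prev count
    by_cases hx : x = prev
    · by_cases h7 : count + 1 ≥ 7 <;>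
        simp [dangerousPlayGo, anyRun7, hx, h7, ih]
    · simp [dangerousPlayGo, anyRun7, hx, ih]

def any7 (runs : List (String × Int)) : Bool := runs.any (fun r => decide (7 ≤ r.2))

theorem goB (rest : List String) : ∀ (acc : List (String × Int)) (q : String) (n : Int),
    any7 (rest.foldl dangerousPlayStep (acc ++ [(q, n)]))
      = (any7 acc || anyRun7 q n rest || decide (7 ≤ n)) := by
  induction rest with
  | nil => intro acc q n; simp [any7, anyRun7, Bool.or_comm]
  | cons x rest ih =>
    intro acc q n
    have hstep : dangerousPlayStep (acc ++ [(q, n)]) x =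
        if q = x then acc ++ [(q, n + 1)] else (acc ++ [(q, n)]) ++ [(x, 1)] := by
      simp [dangerousPlayStep]
    by_cases hq : q = x
    · subst hq
      rw [List.foldl_cons, hstep, if_pos rfl, ih]
      simp only [anyRun7, ge_iff_le]
      by_cases h7 : (7 : Int) ≤ n + 1
      · simp [h7]
      · have hn : ¬ (7 : Int) ≤ n := by omega
        simp [h7, hn]
    · have hx : ¬ x = q := fun h => hq h.symm
      rw [List.foldl_cons]
      calc any7 (List.foldl dangerousPlayStep (dangerousPlayStep (acc ++ [(q, n)]) x) rest)
          = any7 (List.foldl dangerousPlayStep ((acc ++ [(q, n)]) ++ [(x, 1)]) rest) := by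
            rw [hstep, if_neg hq]
        _ = (any7 (acc ++ [(q, n)]) || anyRun7 x 1 rest || decide ((7 : Int) ≤ 1)) := ih _ _ _
        _ = (any7 acc || anyRun7 q n (x :: rest) || decide ((7 : Int) ≤ n)) := by
            simp [any7, anyRun7, if_neg hx, Bool.or_comm, Bool.or_left_comm]

-- ===== VERDICT (by name: the statement is the Claim_ definition above) =====
theorem dangerousPlay_spec : Claim_equal_dangerousPlay := by
  intro players _
  unfold Spec_dangerousPlay
  match players with
  | [] => rfl
  | p0 :: rest =>
    have h := goB rest [] p0 1
    simp only [any7, List.nil_append] at h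
    rw [dangerousPlay, goA]
    simp [dangerousPlay_alt, dangerousPlayStep, List.foldl_cons, h]
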